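-- pv_equiv track=rewrite | github.com/nitvishn/ProjectEuler | p090.py | satisfies_property
-- ===== SOURCE A (Python) =====
-- from copy import copy
--
-- def satisfies_property(input_c1, input_c2):
--     not_found = set([1, 4, 9, 16, 25, 36, 49, 64, 81])
--     c1 = copy(input_c1)
--     c2 = copy(input_c2)
--     if 6 in c1:
--         c1.add(9)
--     elif 9 in c1:
--         c1.add(6)
--     if 6 in c2:
--         c2.add(9)
--     elif 9 in c2:
--         c2.add(6)
--     for a in c1:
--         for b in c2:
--             if 10*a + b in not_found:
--                 not_found.remove(10*a + b)
--             if 10*b + a in not_found: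
--                 not_found.remove(10*b + a)
--     if len(not_found) == 0:
--         return True
--     return False
-- ===== SOURCE B (Python) =====
-- def satisfies_property(input_c1, input_c2):
--     c1 = set(input_c1)
--     c2 = set(input_c2)
--     if 6 in c1:
--         c1.add(9)
--     elif 9 in c1:
--         c1.add(6)
--     if 6 in c2:
--         c2.add(9)
--     elif 9 in c2:
--         c2.add(6)
--     return all(
--         any(s - 10 * a in c2 for a in c1) or any(s - 10 * b in c1 for b in c2)
--         for s in [1, 4, 9, 16, 25, 36, 49, 64, 81]
--     )
-- ===== Notes on version B (the rewrite author's own statement) =====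
-- stated objective: faster
-- what changed: Replaces A's generate-and-eliminate double loop over all pairs of c1 x c2 (removing formed numbers from a not-found set) with a direct per-target check: for each of the nine squares, search for a digit a in one set whose complement s-10*a lies in the other.
import Mathlib
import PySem

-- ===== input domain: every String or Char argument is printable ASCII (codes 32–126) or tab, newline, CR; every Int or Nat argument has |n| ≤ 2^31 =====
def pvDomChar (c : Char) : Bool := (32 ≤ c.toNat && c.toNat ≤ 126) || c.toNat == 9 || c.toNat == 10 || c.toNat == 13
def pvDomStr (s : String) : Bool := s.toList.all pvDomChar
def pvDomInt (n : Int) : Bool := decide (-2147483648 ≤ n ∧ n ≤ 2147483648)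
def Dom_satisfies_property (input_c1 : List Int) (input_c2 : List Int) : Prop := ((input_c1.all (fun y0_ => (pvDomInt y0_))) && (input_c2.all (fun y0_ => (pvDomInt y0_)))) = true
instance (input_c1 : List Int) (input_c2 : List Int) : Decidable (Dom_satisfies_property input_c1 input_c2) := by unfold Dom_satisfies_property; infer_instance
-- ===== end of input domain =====

-- B replaces A's eliminate-all-formed-pairs double loop over c1 x c2 by a direct
-- per-target-square existence search; same return value on every input.

-- ===== PORT A =====
-- inner 'for b in c2' loop of A (removal of 10*a+b and 10*b+a from not_found, guarded as in the Python)
def pvInnerA (a : Int) (c2 : PySem.Set Int) (nf : PySem.Set Int) : PySem.Set Int :=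
  c2.foldl (fun nf b =>
    let nf := if PySem.Set.contains nf (10 * a + b) then PySem.Set.discard nf (10 * a + b) else nf
    if PySem.Set.contains nf (10 * b + a) then PySem.Set.discard nf (10 * b + a) else nf) nf

-- outer 'for a in c1' loop of A
def pvOuterA (c1 c2 : PySem.Set Int) (nf : PySem.Set Int) : PySem.Set Int :=
  c1.foldl (fun nf a => pvInnerA a c2 nf) nf

def satisfies_property (input_c1 : List Int) (input_c2 : List Int) : Bool :=
  let not_found : PySem.Set Int := PySem.Set.ofList [1, 4, 9, 16, 25, 36, 49, 64, 81]
  let c1 : PySem.Set Int := PySem.Set.ofList input_c1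
  let c2 : PySem.Set Int := PySem.Set.ofList input_c2
  let c1 := if PySem.Set.contains c1 6 then PySem.Set.add c1 9
            else if PySem.Set.contains c1 9 then PySem.Set.add c1 6 else c1
  let c2 := if PySem.Set.contains c2 6 then PySem.Set.add c2 9
            else if PySem.Set.contains c2 9 then PySem.Set.add c2 6 else c2
  let not_found := pvOuterA c1 c2 not_found
  if PySem.Set.len not_found == 0 then true else false

-- ===== PORT B =====
def satisfies_property_alt (input_c1 : List Int) (input_c2 : List Int) : Bool :=
  let c1 : PySem.Set Int := PySem.Set.ofList input_c1
  let c2 : PySem.Set Int := PySem.Set.ofList input_c2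
  let c1 := if PySem.Set.contains c1 6 then PySem.Set.add c1 9
            else if PySem.Set.contains c1 9 then PySem.Set.add c1 6 else c1
  let c2 := if PySem.Set.contains c2 6 then PySem.Set.add c2 9
            else if PySem.Set.contains c2 9 then PySem.Set.add c2 6 else c2
  [1, 4, 9, 16, 25, 36, 49, 64, 81].all (fun s =>
    c1.any (fun a => PySem.Set.contains c2 (s - 10 * a)) ||
    c2.any (fun b => PySem.Set.contains c1 (s - 10 * b)))

-- ===== PRECONDITION & SPEC =====
def Spec_satisfies_property (input_c1 : List Int) (input_c2 : List Int) (out : Bool) : Prop := out = satisfies_property_alt input_c1 input_c2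
instance (input_c1 : List Int) (input_c2 : List Int) (out : Bool) : Decidable (Spec_satisfies_property input_c1 input_c2 out) := by unfold Spec_satisfies_property; infer_instance

-- ===== CLAIM (what is proved, stated in full; the proofs are below) =====
def Claim_equal_satisfies_property : Prop := ∀ (input_c1 : List Int) (input_c2 : List Int), Dom_satisfies_property input_c1 input_c2 → Spec_satisfies_property input_c1 input_c2 (satisfies_property input_c1 input_c2)

-- ===== LEMMAS AND PROOFS =====

theorem pvMemStep (a b x : Int) (nf : PySem.Set Int) :
    (x ∈ (let nf' := if PySem.Set.contains nf (10 * a + b) then PySem.Set.discard nf (10 * a + b) else nf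
          if PySem.Set.contains nf' (10 * b + a) then PySem.Set.discard nf' (10 * b + a) else nf')
      ↔ x ∈ nf ∧ x ≠ 10 * a + b ∧ x ≠ 10 * b + a) := by
  simp only []
  split_ifs with h1 h2 h2 <;>
    simp only [PySem.Set.contains_iff, PySem.Set.mem_discard, not_and, not_not] at h1 h2 ⊢
  · tauto
  · constructor
    · rintro ⟨hx, hne⟩
      exact ⟨hx, hne, fun hv => hne (hv.trans (h2 (hv ▸ hx)))⟩
    · rintro ⟨hx, hne1, _⟩
      exact ⟨hx, hne1⟩
  · constructor
    · rintro ⟨hx, hne⟩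
      exact ⟨hx, fun hv => h1 (hv ▸ hx), hne⟩
    · rintro ⟨hx, _, hne2⟩
      exact ⟨hx, hne2⟩
  · constructor
    · intro hx
      exact ⟨hx, fun hv => h1 (hv ▸ hx), fun hv => h2 (hv ▸ hx)⟩
    · exact fun h => h.1

theorem pvInnerA_charac (a x : Int) (c2 : List Int) (nf : PySem.Set Int) :
    x ∈ pvInnerA a c2 nf ↔ x ∈ nf ∧ ∀ b ∈ c2, x ≠ 10 * a + b ∧ x ≠ 10 * b + a := by
  induction c2 generalizing nf with
  | nil => simp [pvInnerA]
  | cons b c2 ih =>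
    rw [show pvInnerA a (b :: c2) nf = pvInnerA a c2 _ from rfl, ih, pvMemStep,
      List.forall_mem_cons]
    tauto

theorem pvOuterA_charac (x : Int) (c1 c2 : List Int) (nf : PySem.Set Int) :
    x ∈ pvOuterA c1 c2 nf ↔ x ∈ nf ∧ ∀ a ∈ c1, ∀ b ∈ c2, x ≠ 10 * a + b ∧ x ≠ 10 * b + a := by
  induction c1 generalizing nf with
  | nil => simp [pvOuterA]
  | cons a c1 ih =>
    rw [show pvOuterA (a :: c1) c2 nf = pvOuterA c1 c2 _ from rfl, ih, pvInnerA_charac,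
      List.forall_mem_cons]
    tauto

-- one target square is eliminated by A's loops iff B's per-square search succeeds
theorem pvSquare_iff (s : Int) (c1 c2 : List Int) :
    (¬ ∀ a ∈ c1, ∀ b ∈ c2, s ≠ 10 * a + b ∧ s ≠ 10 * b + a) ↔
    (c1.any (fun a => PySem.Set.contains c2 (s - 10 * a)) ||
     c2.any (fun b => PySem.Set.contains c1 (s - 10 * b))) = true := by
  simp only [Bool.or_eq_true, List.any_eq_true, PySem.Set.contains_iff]
  constructor
  · intro h
    push Not at h
    obtain ⟨a, ha, b, hb, h⟩ := h
    by_cases he : s = 10 * a + b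
    · exact Or.inl ⟨a, ha, (show s - 10 * a = b by omega) ▸ hb⟩
    · exact Or.inr ⟨b, hb, (show s - 10 * b = a by omega) ▸ ha⟩
  · rintro (⟨a, ha, hmem⟩ | ⟨b, hb, hmem⟩) h
    · exact (h a ha _ hmem).1 (by omega)
    · exact (h _ hmem b hb).2 (by omega)

-- ===== VERDICT (by name: the statement is the Claim_ definition above) =====
theorem satisfies_property_spec : Claim_equal_satisfies_property := by
  intro input_c1 input_c2 _
  unfold Spec_satisfies_property satisfies_property satisfies_property_alt
  simp only []
  set c1 := (if PySem.Set.contains (PySem.Set.ofList input_c1) 6 then PySem.Set.add (PySem.Set.ofList input_c1) 9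
            else if PySem.Set.contains (PySem.Set.ofList input_c1) 9 then PySem.Set.add (PySem.Set.ofList input_c1) 6
            else PySem.Set.ofList input_c1) with hc1
  set c2 := (if PySem.Set.contains (PySem.Set.ofList input_c2) 6 then PySem.Set.add (PySem.Set.ofList input_c2) 9
            else if PySem.Set.contains (PySem.Set.ofList input_c2) 9 then PySem.Set.add (PySem.Set.ofList input_c2) 6
            else PySem.Set.ofList input_c2) with hc2
  have hchar := fun x => pvOuterA_charac x c1 c2 (PySem.Set.ofList [1, 4, 9, 16, 25, 36, 49, 64, 81])
  rw [Bool.eq_iff_iff]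
  constructor
  · intro h
    have hempty : pvOuterA c1 c2 (PySem.Set.ofList [1, 4, 9, 16, 25, 36, 49, 64, 81]) = [] := by
      by_contra hne
      simp [PySem.Set.len, List.length_eq_zero_iff, hne] at h
    rw [List.all_eq_true]
    intro s hs
    rw [← pvSquare_iff s c1 c2]
    intro hall
    have : s ∈ pvOuterA c1 c2 (PySem.Set.ofList [1, 4, 9, 16, 25, 36, 49, 64, 81]) := by
      rw [hchar s]
      refine ⟨by rw [PySem.Set.mem_ofList]; exact hs, hall⟩
    rw [hempty] at this
    simp at this
  · intro h
    have hempty : pvOuterA c1 c2 (PySem.Set.ofList [1, 4, 9, 16, 25, 36, 49, 64, 81]) = [] := by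
      rw [List.eq_nil_iff_forall_not_mem]
      intro s hsmem
      rw [hchar s, PySem.Set.mem_ofList] at hsmem
      obtain ⟨hs, hall⟩ := hsmem
      rw [List.all_eq_true] at h
      exact (pvSquare_iff s c1 c2).mpr (h s hs) hall
    simp [hempty, PySem.Set.len]
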